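-- pv_equiv track=rewrite | github.com/ashizawaN/LeetCode | #2037-2_Minimum_Number_of_Moves_to_Seat_Everyone.py | minMovesToSeat
-- ===== SOURCE A (Python) =====
-- from typing import List
--
-- def minMovesToSeat(seats: List[int], students: List[int]) -> int:
--     seats_num = [0] * (max(seats)+1)
--     students_num = [0] * (max(students)+1)
--     for seat in seats:
--         seats_num[seat] += 1
--     for student in students:
--         students_num[student] += 1
--     num = 0
--     i = j = 1
--     while i < len(students_num):
--         if students_num[i]:
--             while j < len(seats_num) and not seats_num[j]:
--                 j += 1
--             num += abs(i - j)
--             seats_num[j] -= 1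
--             students_num[i] -= 1
--         else:
--             i += 1
--     return num
-- ===== SOURCE B (Python) =====
-- def minMovesToSeat(seats, students):
--     seat_cnt = [0] * (max(seats) + 1)
--     stu_cnt = [0] * (max(students) + 1)
--     for s in seats:
--         seat_cnt[s] += 1
--     for t in students:
--         stu_cnt[t] += 1
--     seat_vals = [v for v in range(1, len(seat_cnt)) for _ in range(seat_cnt[v])]
--     stu_vals = [v for v in range(1, len(stu_cnt)) for _ in range(stu_cnt[v])]
--     return sum(abs(a - b) for a, b in zip(seat_vals, stu_vals))
-- ===== Notes on version B (the rewrite author's own statement) =====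
-- stated objective: alternative
-- what changed: B keeps counting tables (seat numbers are 1-based, so they are read from slot 1) but replaces A's mutating two-pointer walk over both tables by expanding each histogram into its sorted value list and summing |seat - student| over a single zip; Pre_ excludes only the inputs on which A raises (empty list via max, a negative maximum making the table empty, a value below -(max+1) out of indexing range, or more counted students than counted seats, where A's seat pointer runs off the table).
import Mathlib
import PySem

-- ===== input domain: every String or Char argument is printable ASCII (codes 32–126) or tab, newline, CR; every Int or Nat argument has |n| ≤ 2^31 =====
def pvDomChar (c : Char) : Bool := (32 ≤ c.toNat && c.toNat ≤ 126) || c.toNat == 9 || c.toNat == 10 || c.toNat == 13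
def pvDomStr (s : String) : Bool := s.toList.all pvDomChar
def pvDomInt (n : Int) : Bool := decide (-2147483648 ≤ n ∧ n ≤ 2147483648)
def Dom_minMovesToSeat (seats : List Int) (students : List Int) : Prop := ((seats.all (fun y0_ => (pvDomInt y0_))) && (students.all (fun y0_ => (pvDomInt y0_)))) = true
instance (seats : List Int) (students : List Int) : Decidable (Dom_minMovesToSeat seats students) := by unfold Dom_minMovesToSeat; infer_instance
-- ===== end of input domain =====

-- B keeps the counting tables but replaces A's mutating two-pointer walk over both tables by
-- expanding each histogram into its sorted value list and summing |seat − student| over one zip.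

-- ===== PORT A =====
-- xs[idx] += 1  (Python indexing: negative indices wrap; out of range raises, modelled by the
-- total pySetD/pyGetD, which leave the list unchanged there — unreachable under Pre_)
def pvInc (l : List Int) (idx : Int) : List Int :=
  PySem.List.pySetD l idx (PySem.List.pyGetD l idx 0 + 1)

-- inner 'while j < len(seats_num) and not seats_num[j]: j += 1'
-- (the table is walked as the suffix starting at j, kept alongside the index j)
def pvAdvance (sSuf : List Int) (j : Nat) : List Int × Nat :=
  match sSuf with
  | [] => ([], j)
  | a :: rest => if a = 0 then pvAdvance rest (j + 1) else (a :: rest, j)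

-- outer 'while i < len(students_num)' loop; fuel is a termination bound (chosen large enough at
-- the call site to never run out); the 'else num' at j' ≥ len is where Python raises IndexError
-- (excluded by Pre_).
-- state: the suffixes of the two tables starting at the current indices i and j, plus i, j
-- ([] for students_num is 'i ≥ len'; pvAdvance returning [] is where Python raises IndexError)
def pvLoop (fuel : Nat) (sSuf stSuf : List Int) (i j : Nat) (num : Int) : Int :=
  match fuel, stSuf with
  | 0, _ => num
  | _ + 1, [] => num
  | fuel' + 1, c :: rest =>
    if c ≠ 0 then
      match pvAdvance sSuf j with
      | (d :: sRest, j') =>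
        pvLoop fuel' ((d - 1) :: sRest) ((c - 1) :: rest) i j'
          (num + |(i : Int) - (j' : Int)|)
      | ([], _) => num
    else pvLoop fuel' sSuf rest (i + 1) j num

def minMovesToSeat (seats : List Int) (students : List Int) : Int :=
  match PySem.List.max? seats (fun x => x), PySem.List.max? students (fun x => x) with
  | some ms, some mt =>
    let sN := seats.foldl pvInc (List.replicate (ms + 1).toNat 0)
    let stN := students.foldl pvInc (List.replicate (mt + 1).toNat 0)
    pvLoop (stN.length + students.length + 1) (sN.drop 1) (stN.drop 1) 1 1 0
  | _, _ => 0   -- Python raises ValueError (max of an empty list); excluded by Pre_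

-- ===== PORT B =====
-- '[v for v in range(1, len(cnt)) for _ in range(cnt[v])]': v walks the indices 1 … len-1 and
-- cnt[v] is the count at v, so the loop is the structural recursion over the table's tail
-- carrying the current value v ('for _ in range(c)' = replicate, empty for c ≤ 0 like Python)
def pvValsAux : List Int → Int → List Int → List Int
  | [], _, acc => acc
  | c :: rest, v, acc => pvValsAux rest (v + 1) (acc ++ List.replicate c.toNat v)

def pvVals (cnt : List Int) : List Int := pvValsAux (cnt.drop 1) 1 []

def minMovesToSeat_alt (seats : List Int) (students : List Int) : Int :=
  match PySem.List.max? seats (fun x => x) with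
  | none => 0   -- Python raises ValueError (max of an empty list); excluded by Pre_
  | some ms =>
    match PySem.List.max? students (fun x => x) with
    | none => 0   -- ValueError likewise; excluded by Pre_
    | some mt =>
      let seatCnt := seats.foldl pvInc (List.replicate (ms + 1).toNat 0)
      let stuCnt := students.foldl pvInc (List.replicate (mt + 1).toNat 0)
      ((pvVals seatCnt).zip (pvVals stuCnt)).foldl (fun acc p => acc + |p.1 - p.2|) 0

-- ===== PRECONDITION & SPEC =====
-- max(l); the 0 default stands for the empty case, where Python's max raises (excluded by Pre_)
def pvMaxD (l : List Int) : Int := (PySem.List.max? l (fun x => x)).getD 0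

-- the multiset of values A's walk actually pairs: each value reduced by Python's indexing
-- (x % (max+1), the wraparound of a negative index), with the zero slot skipped by the
-- walk's start at index 1
def pvEff (l : List Int) : List Int :=
  (l.filter (fun x => decide (0 < PySem.Int.mod x (pvMaxD l + 1)))).map
    (fun x => PySem.Int.mod x (pvMaxD l + 1))

-- Pre_ is exactly where the Python A returns: both lists nonempty (else max raises ValueError),
-- a nonnegative maximum (else the frequency table is empty and the first increment raises
-- IndexError), every value no smaller than -(max+1) (else the table index raises IndexError),
-- and at most as many counted students as counted seats (else the seat walk runs off the table
-- and raises IndexError).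
def Pre_minMovesToSeat (seats : List Int) (students : List Int) : Prop :=
  seats ≠ [] ∧ students ≠ [] ∧ 0 ≤ pvMaxD seats ∧ 0 ≤ pvMaxD students ∧
    (∀ s ∈ seats, -(pvMaxD seats + 1) ≤ s) ∧ (∀ t ∈ students, -(pvMaxD students + 1) ≤ t) ∧
    (pvEff students).length ≤ (pvEff seats).length
instance (seats : List Int) (students : List Int) : Decidable (Pre_minMovesToSeat seats students) := by
  unfold Pre_minMovesToSeat; infer_instance
def pvWitness_minMovesToSeat : List Int × List Int := ([3, 1, 5], [2, 7, 4])

def Spec_minMovesToSeat (seats : List Int) (students : List Int) (out : Int) : Prop := out = minMovesToSeat_alt seats students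
instance (seats : List Int) (students : List Int) (out : Int) : Decidable (Spec_minMovesToSeat seats students out) := by unfold Spec_minMovesToSeat; infer_instance

-- ===== CLAIM (what is proved, stated in full; the proofs are below) =====
def Claim_equal_minMovesToSeat : Prop := ∀ (seats : List Int) (students : List Int), Dom_minMovesToSeat seats students → Pre_minMovesToSeat seats students → Spec_minMovesToSeat seats students (minMovesToSeat seats students)

-- ===== LEMMAS AND PROOFS =====

-- expand c k = the sorted list whose multiset of elements has c[m] copies of (k+m)
def pvExpand : List Int → Nat → List Int
  | [], _ => []
  | c :: cs, k => List.replicate c.toNat (k : Int) ++ pvExpand cs (k + 1)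

theorem pvExpand_replicate_zero (n k : Nat) : pvExpand (List.replicate n 0) k = [] := by
  induction n generalizing k with
  | zero => rfl
  | succ n ih => simp [pvExpand, List.replicate_succ, ih]

theorem length_pvInc (l : List Int) (x : Int) : (pvInc l x).length = l.length := by
  simp [pvInc, PySem.List.length_pySetD]

theorem pvExpand_mem_ge (c : List Int) (k : Nat) :
    ∀ v ∈ pvExpand c k, (k : Int) ≤ v := by
  induction c generalizing k with
  | nil => intro v hv; simp [pvExpand] at hv
  | cons a cs ih =>
    intro v hv
    simp only [pvExpand, List.mem_append, List.mem_replicate] at hv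
    rcases hv with ⟨-, rfl⟩ | hv
    · exact le_refl _
    · have := ih (k + 1) v hv
      push_cast at this ⊢; omega

-- Python indexing with a possibly negative in-range index resolves to the (i % len) slot
theorem pvEmodToNat_lt (i : Int) (n : Nat) (h : 0 < n) : (i % (n : Int)).toNat < n := by
  have h1 := Int.emod_nonneg i (show ((n : Nat) : Int) ≠ 0 by exact_mod_cast Nat.pos_iff_ne_zero.mp h)
  have h2 := Int.emod_lt_of_pos i (show (0 : Int) < ((n : Nat) : Int) by exact_mod_cast h)
  omega

theorem pvIdx_emod (n : Nat) (i : Int) (h0 : 0 < n) (h1 : -(n : Int) ≤ i) (h2 : i < n) :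
    PySem.List.pyIdx? n i = some (i % (n : Int)).toNat := by
  simp only [PySem.List.pyIdx?]
  by_cases hi : 0 ≤ i
  · rw [if_pos hi, if_pos h2, Int.emod_eq_of_lt hi h2]
  · have hmod : i % (n : Int) = i + n := by
      have ha : (i + (n : Int) * 1) % (n : Int) = i % (n : Int) := Int.add_mul_emod_self_left i (n : Int) 1
      have hb : (i + (n : Int)) % (n : Int) = i + n :=
        Int.emod_eq_of_lt (by omega) (by omega)
      rw [mul_one] at ha
      omega
    rw [if_neg hi, if_pos h1, hmod]
    congr 1
    omega

theorem pvGetD_emod (xs : List Int) (i : Int) (d : Int) (h0 : 0 < xs.length)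
    (h1 : -(xs.length : Int) ≤ i) (h2 : i < xs.length) :
    PySem.List.pyGetD xs i d = xs[(i % (xs.length : Int)).toNat]'(pvEmodToNat_lt i xs.length h0) := by
  simp only [PySem.List.pyGetD, PySem.List.pyGet?, pvIdx_emod xs.length i h0 h1 h2]
  change (xs[(i % (xs.length : Int)).toNat]?).getD d = _
  rw [List.getElem?_eq_getElem (pvEmodToNat_lt i xs.length h0)]
  rfl

theorem pvSetD_emod (xs : List Int) (i : Int) (v : Int) (h0 : 0 < xs.length)
    (h1 : -(xs.length : Int) ≤ i) (h2 : i < xs.length) :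
    PySem.List.pySetD xs i v = xs.set (i % (xs.length : Int)).toNat v := by
  simp only [PySem.List.pySetD, PySem.List.pySet?, pvIdx_emod xs.length i h0 h1 h2]
  rfl

theorem pvInc_emod (acc : List Int) (x : Int) (h0 : 0 < acc.length)
    (h1 : -(acc.length : Int) ≤ x) (h2 : x < acc.length) :
    pvInc acc x = acc.set (x % (acc.length : Int)).toNat
      (acc[(x % (acc.length : Int)).toNat]'(pvEmodToNat_lt x acc.length h0) + 1) := by
  simp only [pvInc, pvSetD_emod acc x _ h0 h1 h2, pvGetD_emod acc x 0 h0 h1 h2]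

-- incrementing slot m inserts one copy of (k+m) into the expansion
theorem pvExpand_set_succ (acc : List Int) (m k : Nat) (hm : m < acc.length)
    (hnn : 0 ≤ acc[m]) :
    (pvExpand (acc.set m (acc[m] + 1)) k).Perm (((k + m : Nat) : Int) :: pvExpand acc k) := by
  induction acc generalizing m k with
  | nil => simp at hm
  | cons a cs ih =>
    cases m with
    | zero =>
      simp only [List.getElem_cons_zero] at hnn
      simp only [List.set_cons_zero, pvExpand, List.getElem_cons_zero]
      have : (a + 1).toNat = a.toNat + 1 := by omega
      simp [this, List.replicate_succ]
    | succ m =>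
      simp only [List.length_cons, Nat.succ_lt_succ_iff] at hm
      simp only [List.getElem_cons_succ] at hnn ⊢
      simp only [List.set_cons_succ, pvExpand]
      have h1 := ih m (k + 1) hm hnn
      have hcast : ((k + 1 + m : Nat) : Int) = ((k + (m + 1) : Nat) : Int) := by push_cast; ring
      have h2 : (List.replicate a.toNat (k : Int) ++ pvExpand (cs.set m (cs[m] + 1)) (k + 1)).Perm
          (List.replicate a.toNat (k : Int) ++ (((k + 1 + m : Nat) : Int) :: pvExpand cs (k + 1))) :=
        List.Perm.append_left _ h1
      rw [hcast] at h2
      exact h2.trans List.perm_middle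

theorem pvExpand_foldl (l acc : List Int)
    (hb : ∀ x ∈ l, -(acc.length : Int) ≤ x ∧ x < (acc.length : Int)) (h0 : 0 < acc.length)
    (hnn : ∀ y ∈ acc, 0 ≤ y) :
    (pvExpand (l.foldl pvInc acc) 0).Perm
      (l.map (fun x => x % (acc.length : Int)) ++ pvExpand acc 0) := by
  induction l generalizing acc with
  | nil => simp
  | cons x t ih =>
    obtain ⟨hxl, hxu⟩ := hb x (by simp)
    have hm0 : 0 ≤ x % (acc.length : Int) := Int.emod_nonneg x (by exact_mod_cast Nat.pos_iff_ne_zero.mp h0)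
    have hmlt : (x % (acc.length : Int)).toNat < acc.length := pvEmodToNat_lt x acc.length h0
    have hinc := pvInc_emod acc x h0 hxl hxu
    have hb' : ∀ y ∈ t, -((pvInc acc x).length : Int) ≤ y ∧ y < ((pvInc acc x).length : Int) := by
      intro y hy; rw [length_pvInc]; exact hb y (by simp [hy])
    have hnn' : ∀ y ∈ pvInc acc x, 0 ≤ y := by
      intro y hy
      rw [hinc] at hy
      rcases List.mem_or_eq_of_mem_set hy with h | rfl
      · exact hnn y h
      · have := hnn (acc[(x % (acc.length : Int)).toNat]'hmlt) (by simp); omega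
    have h1 := ih (pvInc acc x) hb' (by rw [length_pvInc]; exact h0) hnn'
    have h2 : (pvExpand (pvInc acc x) 0).Perm ((x % (acc.length : Int)) :: pvExpand acc 0) := by
      rw [hinc]
      have := pvExpand_set_succ acc (x % (acc.length : Int)).toNat 0 hmlt (hnn _ (by simp))
      simpa [Int.toNat_of_nonneg hm0] using this
    have h3 : ((pvInc acc x).length : Int) = (acc.length : Int) := by rw [length_pvInc]
    rw [h3] at h1
    simp only [List.foldl_cons, List.map_cons]
    exact h1.trans ((List.Perm.append_left _ h2).trans List.perm_middle)

theorem pvHist_length (l : List Int) (acc : List Int) :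
    (l.foldl pvInc acc).length = acc.length := by
  induction l generalizing acc with
  | nil => rfl
  | cons x t ih => simp [List.foldl_cons, ih, length_pvInc]

theorem pvHist_nonneg (l : List Int) (acc : List Int)
    (hb : ∀ x ∈ l, -(acc.length : Int) ≤ x ∧ x < (acc.length : Int)) (h0 : 0 < acc.length)
    (hnn : ∀ y ∈ acc, 0 ≤ y) :
    ∀ y ∈ l.foldl pvInc acc, 0 ≤ y := by
  induction l generalizing acc with
  | nil => exact hnn
  | cons x t ih =>
    obtain ⟨hxl, hxu⟩ := hb x (by simp)
    have hmlt : (x % (acc.length : Int)).toNat < acc.length := pvEmodToNat_lt x acc.length h0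
    have hinc := pvInc_emod acc x h0 hxl hxu
    refine ih (pvInc acc x) ?_ (by rw [length_pvInc]; exact h0) ?_
    · intro y hy; rw [length_pvInc]; exact hb y (by simp [hy])
    · intro y hy
      rw [hinc] at hy
      rcases List.mem_or_eq_of_mem_set hy with h | rfl
      · exact hnn y h
      · have := hnn (acc[(x % (acc.length : Int)).toNat]'hmlt) (by simp); omega

theorem pvExpand_cons_pos (c : Int) (rest : List Int) (k : Nat) (hp : c ≠ 0) (hnn : 0 ≤ c) :
    pvExpand (c :: rest) k =
      (k : Int) :: (List.replicate (c.toNat - 1) (k : Int) ++ pvExpand rest (k + 1)) := by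
  have : c.toNat = (c.toNat - 1) + 1 := by omega
  simp only [pvExpand]
  rw [this, List.replicate_succ]
  rfl

theorem pvExpand_cons_dec (c : Int) (rest : List Int) (k : Nat) (hnn : 0 ≤ c) :
    pvExpand ((c - 1) :: rest) k =
      List.replicate (c.toNat - 1) (k : Int) ++ pvExpand rest (k + 1) := by
  simp only [pvExpand]
  congr 2
  omega

theorem pvAdvance_spec (sSuf : List Int) (j : Nat) (hne : pvExpand sSuf j ≠ []) :
    ∃ d sRest j', pvAdvance sSuf j = (d :: sRest, j') ∧ d ≠ 0 ∧
      pvExpand (d :: sRest) j' = pvExpand sSuf j ∧ ∀ y ∈ d :: sRest, y ∈ sSuf := by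
  induction sSuf generalizing j with
  | nil => exact absurd rfl hne
  | cons a rest ih =>
    by_cases ha : a = 0
    · have hexp : pvExpand (a :: rest) j = pvExpand rest (j + 1) := by
        simp [pvExpand, ha]
      rw [hexp] at hne
      obtain ⟨d, sRest, j', heq, hd, hexp', hsub⟩ := ih (j + 1) hne
      refine ⟨d, sRest, j', ?_, hd, by rw [hexp', hexp], fun y hy => by simp [hsub y hy]⟩
      simp [pvAdvance, ha, heq]
    · exact ⟨a, rest, j, by simp [pvAdvance, ha], ha, rfl, fun y hy => hy⟩

-- recursive pair-sum Σ|a-b| over the zip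
def pvPairSum : List Int → List Int → Int
  | x :: xs, y :: ys => |x - y| + pvPairSum xs ys
  | _, _ => 0

theorem pvFoldl_pairSum (xs ys : List Int) (acc : Int) :
    (xs.zip ys).foldl (fun a p => a + |p.1 - p.2|) acc = acc + pvPairSum xs ys := by
  induction xs generalizing ys acc with
  | nil => simp [pvPairSum]
  | cons x xs ih =>
    cases ys with
    | nil => simp [pvPairSum]
    | cons y ys => simp [pvPairSum, ih, add_assoc]

theorem pvPairSum_nil_right (xs : List Int) : pvPairSum xs [] = 0 := by
  cases xs <;> rfl

-- main loop invariant: with nonnegative count-table suffixes and at least as many remaining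
-- seats as remaining students, the loop adds Σ|seat − student| over the paired expansions
theorem pvLoop_spec (fuel : Nat) (sSuf stSuf : List Int) (i j : Nat) (num : Int)
    (hsnn : ∀ y ∈ sSuf, 0 ≤ y) (htnn : ∀ y ∈ stSuf, 0 ≤ y)
    (hlen : (pvExpand stSuf i).length ≤ (pvExpand sSuf j).length)
    (hfuel : stSuf.length + (pvExpand stSuf i).length < fuel) :
    pvLoop fuel sSuf stSuf i j num =
      num + pvPairSum (pvExpand sSuf j) (pvExpand stSuf i) := by
  match fuel, stSuf with
  | 0, _ => omega
  | fuel' + 1, [] =>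
    simp [pvLoop, pvExpand, pvPairSum_nil_right]
  | fuel' + 1, c :: rest =>
    rw [pvLoop]
    by_cases hz : c = 0
    · rw [if_neg (by simpa using hz)]
      have hexp : pvExpand (c :: rest) i = pvExpand rest (i + 1) := by
        simp [pvExpand, hz]
      rw [hexp] at hlen hfuel ⊢
      exact pvLoop_spec fuel' sSuf rest (i + 1) j num hsnn
        (fun y hy => htnn y (by simp [hy])) hlen
        (by simp only [List.length_cons] at hfuel; omega)
    · rw [if_pos (by simpa using hz)]
      have hnnC : 0 ≤ c := htnn c (by simp)
      have hstexp := pvExpand_cons_pos c rest i hz hnnC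
      have hne : pvExpand sSuf j ≠ [] := by
        intro hnil
        rw [hnil, hstexp] at hlen
        simp at hlen
      obtain ⟨d, sRest, j', heq, hd, hexp', hsub⟩ := pvAdvance_spec sSuf j hne
      simp only [heq]
      have hnnD : 0 ≤ d := hsnn d (hsub d (by simp))
      have hseexp := pvExpand_cons_pos d sRest j' hd hnnD
      have hstdec := pvExpand_cons_dec c rest i hnnC
      have hsedec := pvExpand_cons_dec d sRest j' hnnD
      have hlen' : (pvExpand ((c - 1) :: rest) i).length ≤ (pvExpand ((d - 1) :: sRest) j').length := by
        rw [hstdec, hsedec]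
        rw [← hexp', hseexp] at hlen
        rw [hstexp] at hlen
        simpa using Nat.le_of_succ_le_succ (by simpa using hlen)
      have hfuel' : ((c - 1) :: rest).length + (pvExpand ((c - 1) :: rest) i).length < fuel' := by
        rw [hstdec]
        rw [hstexp] at hfuel
        simp only [List.length_cons, List.length_append, List.length_replicate] at hfuel ⊢
        omega
      rw [pvLoop_spec fuel' ((d - 1) :: sRest) ((c - 1) :: rest) i j' _
        (by intro y hy
            rcases List.mem_cons.mp hy with rfl | hy'
            · omega
            · exact hsnn y (hsub y (by simp [hy'])))
        (by intro y hy
            rcases List.mem_cons.mp hy with rfl | hy'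
            · omega
            · exact htnn y (by simp [hy']))
        hlen' hfuel']
      rw [hstdec, hsedec, ← hexp', hseexp, hstexp]
      simp only [pvPairSum]
      rw [abs_sub_comm]
      ring

theorem pvFilterMapComm (l : List Int) (f : Int → Int) (p : Int → Bool) :
    ((l.filter (fun x => p (f x))).map f) = (l.map f).filter p := by
  induction l with
  | nil => rfl
  | cons a t ih => by_cases h : p (f a) <;> simp [h, ih]

-- the histogram expansion from slot 1 is a permutation of the normalised positive values
theorem pvExpand_hist_perm (l : List Int) (n : Nat) (h0 : 0 < n)
    (hb : ∀ x ∈ l, -(n : Int) ≤ x ∧ x < (n : Int)) :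
    (pvExpand ((l.foldl pvInc (List.replicate n 0)).drop 1) 1).Perm
      ((l.map (fun x => x % (n : Int))).filter (fun v => decide (0 < v))) := by
  have hlen : (l.foldl pvInc (List.replicate n 0)).length = n := by
    rw [pvHist_length]; simp
  have hperm : (pvExpand (l.foldl pvInc (List.replicate n 0)) 0).Perm
      (l.map (fun x => x % (n : Int))) := by
    have := pvExpand_foldl l (List.replicate n 0) (by simpa using hb) (by simpa using h0) (by simp)
    simpa [pvExpand_replicate_zero] using this
  have hfperm : ((pvExpand (l.foldl pvInc (List.replicate n 0)) 0).filter (fun v => decide (0 < v))).Perm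
      ((l.map (fun x => x % (n : Int))).filter (fun v => decide (0 < v))) :=
    hperm.filter _
  have hfeq : (pvExpand (l.foldl pvInc (List.replicate n 0)) 0).filter (fun v => decide (0 < v))
      = pvExpand ((l.foldl pvInc (List.replicate n 0)).drop 1) 1 := by
    have hpos : 0 < (l.foldl pvInc (List.replicate n 0)).length := by omega
    have hd : l.foldl pvInc (List.replicate n 0) =
        (l.foldl pvInc (List.replicate n 0))[0] :: (l.foldl pvInc (List.replicate n 0)).drop 1 := by
      conv_lhs => rw [← List.drop_zero (l := l.foldl pvInc (List.replicate n 0))]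
      exact List.drop_eq_getElem_cons hpos
    conv_lhs => rw [hd]
    simp only [pvExpand, List.filter_append]
    rw [List.filter_eq_nil_iff.mpr (by intro a ha; simp [List.eq_of_mem_replicate ha]),
      List.filter_eq_self.mpr (by
        intro a ha
        have := pvExpand_mem_ge _ 1 a ha
        simp; omega)]
    rfl
  rw [← hfeq]
  exact hfperm

-- pvEff written over the histogram modulus (the cast (max+1).toNat = max+1 needs 0 ≤ max)
theorem pvEff_eq_filter (l : List Int) (h0 : 0 ≤ pvMaxD l) :
    pvEff l = ((l.map (fun x => x % (((pvMaxD l + 1).toNat : Nat) : Int))).filter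
      (fun v => decide (0 < v))) := by
  have hcast : (((pvMaxD l + 1).toNat : Nat) : Int) = pvMaxD l + 1 := by omega
  have hmod : ∀ x : Int, PySem.Int.mod x (pvMaxD l + 1) = x % (((pvMaxD l + 1).toNat : Nat) : Int) := by
    intro x
    rw [hcast]
    exact PySem.Int.mod_eq_emod_of_pos (by omega)
  unfold pvEff
  simp only [hmod]
  exact pvFilterMapComm l (fun x => x % (((pvMaxD l + 1).toNat : Nat) : Int)) (fun v => decide (0 < v))

-- B's value-list recursion is the histogram expansion
theorem pvValsAux_eq_expand (l : List Int) (k : Nat) (acc : List Int) :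
    pvValsAux l (k : Int) acc = acc ++ pvExpand l k := by
  induction l generalizing k acc with
  | nil => simp [pvValsAux, pvExpand]
  | cons c rest ih =>
    have hcast : ((k : Int) + 1) = (((k + 1 : Nat) : Nat) : Int) := by push_cast; ring
    simp only [pvValsAux, pvExpand, hcast, ih (k + 1)]
    simp [List.append_assoc]

-- ===== VERDICT (by name: the statement is the Claim_ definition above) =====
theorem minMovesToSeat_spec : Claim_equal_minMovesToSeat := by
  intro seats students _hdom hpre
  obtain ⟨hsne, htne, hms0, hmt0, hslb, htlb, hcnt⟩ := hpre
  obtain ⟨ms, hms⟩ : ∃ m, PySem.List.max? seats (fun x => x) = some m := by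
    cases h : PySem.List.max? seats (fun x => x) with
    | none => exact absurd ((PySem.List.max?_eq_none_iff _ _).mp h) hsne
    | some m => exact ⟨m, rfl⟩
  obtain ⟨mt, hmt⟩ : ∃ m, PySem.List.max? students (fun x => x) = some m := by
    cases h : PySem.List.max? students (fun x => x) with
    | none => exact absurd ((PySem.List.max?_eq_none_iff _ _).mp h) htne
    | some m => exact ⟨m, rfl⟩
  have hmsD : pvMaxD seats = ms := by simp [pvMaxD, hms]
  have hmtD : pvMaxD students = mt := by simp [pvMaxD, hmt]
  rw [hmsD] at hms0 hslb
  rw [hmtD] at hmt0 htlb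
  have hmsle := PySem.List.max?_isMax hms
  have hmtle := PySem.List.max?_isMax hmt
  have hnats : (((ms + 1).toNat : Nat) : Int) = ms + 1 := by omega
  have hnatt : (((mt + 1).toNat : Nat) : Int) = mt + 1 := by omega
  have hbs : ∀ x ∈ seats, -(((ms + 1).toNat : Nat) : Int) ≤ x ∧ x < (((ms + 1).toNat : Nat) : Int) := by
    intro x hx
    have := hmsle x hx
    rw [hnats]
    exact ⟨hslb x hx, by omega⟩
  have hbt : ∀ x ∈ students, -(((mt + 1).toNat : Nat) : Int) ≤ x ∧ x < (((mt + 1).toNat : Nat) : Int) := by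
    intro x hx
    have := hmtle x hx
    rw [hnatt]
    exact ⟨htlb x hx, by omega⟩
  set sN := seats.foldl pvInc (List.replicate (ms + 1).toNat 0) with hsN
  set stN := students.foldl pvInc (List.replicate (mt + 1).toNat 0) with hstN
  have hsNlen : sN.length = (ms + 1).toNat := by rw [hsN, pvHist_length]; simp
  have hstNlen : stN.length = (mt + 1).toNat := by rw [hstN, pvHist_length]; simp
  have hvals_s : pvVals sN = pvExpand (sN.drop 1) 1 := by
    unfold pvVals
    exact_mod_cast pvValsAux_eq_expand (sN.drop 1) 1 []
  have hvals_t : pvVals stN = pvExpand (stN.drop 1) 1 := by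
    unfold pvVals
    exact_mod_cast pvValsAux_eq_expand (stN.drop 1) 1 []
  have hperm_s : (pvExpand (sN.drop 1) 1).Perm (pvEff seats) := by
    rw [pvEff_eq_filter seats (by omega), hmsD]
    exact pvExpand_hist_perm seats (ms + 1).toNat (by omega) hbs
  have hperm_t : (pvExpand (stN.drop 1) 1).Perm (pvEff students) := by
    rw [pvEff_eq_filter students (by omega), hmtD]
    exact pvExpand_hist_perm students (mt + 1).toNat (by omega) hbt
  have hloop := pvLoop_spec (stN.length + students.length + 1) (sN.drop 1) (stN.drop 1) 1 1 0
    (fun y hy => pvHist_nonneg seats _ (by simpa using hbs) (by simp; omega) (by simp) y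
      (List.mem_of_mem_drop hy))
    (fun y hy => pvHist_nonneg students _ (by simpa using hbt) (by simp; omega) (by simp) y
      (List.mem_of_mem_drop hy))
    (by rw [hperm_t.length_eq, hperm_s.length_eq]; exact hcnt)
    (by rw [hperm_t.length_eq]
        have hle : (pvEff students).length ≤ students.length := by
          simp only [pvEff, List.length_map]
          exact List.length_filter_le _ students
        have hdrop : (stN.drop 1).length = stN.length - 1 := by simp
        omega)
  unfold Spec_minMovesToSeat minMovesToSeat minMovesToSeat_alt
  rw [hms, hmt]
  simp only [← hsN, ← hstN]
  rw [hloop, hvals_s, hvals_t, pvFoldl_pairSum]
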